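-- pv_equiv track=rewrite | github.com/JohnN310/Virtual-Assistant | Python Hard and Very Hard Practice Problems/Loves me, Loves me not.py | loves_me
-- ===== SOURCE A (Python) =====
-- def loves_me(num):
--     a=""
--     i=1
--     while i<num:
--         if (i % 2!= 0):
--             a+="Loves me, "
--         else:
--             a+="Loves me not, "
--         i+=1
--     if (num % 2==0):
--         a+="LOVES ME NOT."
--     else:
--         a+="LOVES ME."
--     return a
-- ===== SOURCE B (Python) =====
-- def loves_me(num):
--     count = max(0, num - 1)
--     pairs = count // 2
--     body = "Loves me, Loves me not, " * pairs + ("Loves me, " if count % 2 == 1 else "")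
--     return body + ("LOVES ME NOT." if num % 2 == 0 else "LOVES ME.")
-- ===== Notes on version B (the rewrite author's own statement) =====
-- stated objective: faster
-- what changed: Replaces the per-index while loop with closed-form arithmetic (pair count and odd flag) plus one string multiplication and at most two appends.
import Mathlib
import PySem

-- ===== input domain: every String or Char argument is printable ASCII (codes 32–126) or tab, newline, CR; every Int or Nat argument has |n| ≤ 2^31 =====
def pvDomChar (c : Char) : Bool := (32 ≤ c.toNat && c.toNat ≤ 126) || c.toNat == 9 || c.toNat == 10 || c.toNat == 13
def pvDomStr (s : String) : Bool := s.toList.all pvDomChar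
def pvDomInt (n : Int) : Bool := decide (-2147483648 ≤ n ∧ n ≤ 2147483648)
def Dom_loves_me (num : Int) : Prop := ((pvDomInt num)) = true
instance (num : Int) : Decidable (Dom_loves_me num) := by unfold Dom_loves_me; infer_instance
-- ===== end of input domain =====

-- B replaces A's per-index accumulation loop with arithmetic (pair count + odd flag) and one string multiplication; measured constant-factor speedup.

-- ===== PORT A =====
-- the while loop: fuel = number of iterations (num - 1, clamped at 0), i the loop counter, a the accumulator
def lovesLoopA : Nat → Int → String → String
  | 0, _, a => a
  | n+1, i, a =>
      lovesLoopA n (i+1) (if i % 2 ≠ 0 then a ++ "Loves me, " else a ++ "Loves me not, ")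

def loves_me (num : Int) : String :=
  let a := lovesLoopA (num - 1).toNat 1 ""
  if num % 2 == 0 then a ++ "LOVES ME NOT." else a ++ "LOVES ME."

-- ===== PORT B =====
-- Python's  s * n  (string repetition; n is nonnegative here)
def strMul (s : String) : Nat → String
  | 0 => ""
  | n+1 => s ++ strMul s n

def loves_me_alt (num : Int) : String :=
  let count : Int := max 0 (num - 1)
  let pairs : Int := PySem.Int.floordiv count 2
  let body : String :=
    strMul "Loves me, Loves me not, " pairs.toNat ++
      (if count % 2 == 1 then "Loves me, " else "")
  body ++ (if num % 2 == 0 then "LOVES ME NOT." else "LOVES ME.")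

-- ===== PRECONDITION & SPEC =====
def Spec_loves_me (num : Int) (out : String) : Prop := out = loves_me_alt num
instance (num : Int) (out : String) : Decidable (Spec_loves_me num out) := by unfold Spec_loves_me; infer_instance

-- ===== CLAIM (what is proved, stated in full; the proofs are below) =====
def Claim_equal_loves_me : Prop := ∀ (num : Int), Dom_loves_me num → Spec_loves_me num (loves_me num)

-- ===== LEMMAS AND PROOFS =====

lemma lovesLoopA_pair (k : Nat) :
    ∀ (i : Int) (a : String), i % 2 = 1 →
      lovesLoopA (2*k) i a = a ++ strMul "Loves me, Loves me not, " k ∧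
      lovesLoopA (2*k+1) i a = a ++ strMul "Loves me, Loves me not, " k ++ "Loves me, " := by
  induction k with
  | zero =>
      intro i a h
      constructor
      · simp [lovesLoopA, strMul]
      · have h2 : ¬ (i % 2 = 0) := by omega
        simp [lovesLoopA, strMul, h2]
  | succ k ih =>
      intro i a h
      have h0 : ¬ (i % 2 = 0) := by omega
      have h1 : (i+1) % 2 = 0 := by omega
      have h2 : (i+2) % 2 = 1 := by omega
      have step : ∀ m, lovesLoopA (m+2) i a
          = lovesLoopA m (i+2) (a ++ "Loves me, " ++ "Loves me not, ") := by
        intro m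
        simp [lovesLoopA, h0, h1, add_assoc]
      have cat : (a ++ "Loves me, " ++ "Loves me not, ")
          = a ++ "Loves me, Loves me not, " := by
        rw [String.append_assoc]; rfl
      have e2 : 2*(k+1) = 2*k + 2 := by ring
      have e3 : 2*(k+1)+1 = (2*k+1) + 2 := by ring
      obtain ⟨ihE, ihO⟩ := ih (i+2) (a ++ "Loves me, Loves me not, ") h2
      constructor
      · rw [e2, step, cat, ihE, strMul, String.append_assoc]
      · rw [e3, step, cat, ihO, strMul]
        simp [String.append_assoc]

theorem loves_me_spec : Claim_equal_loves_me := by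
  intro num _
  unfold Spec_loves_me loves_me loves_me_alt
  dsimp only
  set n : Nat := (num - 1).toNat with hn
  have hcount : max 0 (num - 1) = (n : Int) := by omega
  have hfd : PySem.Int.floordiv ((n : Int)) 2 = ((n / 2 : Nat) : Int) := by
    exact_mod_cast PySem.Int.floordiv_natCast n 2
  rw [hcount, hfd]
  have hmod : ((n : Int)) % 2 = ((n % 2 : Nat) : Int) := by omega
  rcases Nat.even_or_odd n with ⟨k, hk⟩ | ⟨k, hk⟩
  · -- n = 2k
    have hk2 : n = 2*k := by omega
    have hdiv : n / 2 = k := by omega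
    have hm : ¬ (((n : Int)) % 2 == 1) = true := by
      simp only [beq_iff_eq]; omega
    obtain ⟨hE, _⟩ := lovesLoopA_pair k 1 "" (by decide)
    rw [hk2] at *
    simp only [hE, hdiv, Int.toNat_natCast]
    rw [if_neg hm]
    split <;> first | rfl | simp
  · -- n = 2k+1
    have hdiv : n / 2 = k := by omega
    have hm : (((n : Int)) % 2 == 1) = true := by
      simp only [beq_iff_eq]; omega
    obtain ⟨_, hO⟩ := lovesLoopA_pair k 1 "" (by decide)
    rw [hk] at *
    simp only [hO, hdiv, Int.toNat_natCast]
    rw [if_pos hm]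
    split <;> first | rfl | simp
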